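-- pv_equiv track=rewrite | github.com/rdeioris/necroassembler | necroassembler/assembler.py | _get_math_formula
-- ===== SOURCE A (Python) =====
-- def _get_math_formula(token):
--     pre_formula = ''
--     post_formula = ''
--     for char in token:
--         if char in ('<', '>'):
--             pre_formula += char
--         else:
--             break
--
--     in_math = False
--     valid_chars = 0
--     for char in token[len(pre_formula):]:
--         if not in_math:
--             if char in ('+', '-', '*', '/', '&', '|'):
--                 if valid_chars < 1:
--                     break
--                 in_math = True
--                 post_formula += char
--             else:
--                 valid_chars += 1
--         else:
--             post_formula += char
--
--     if len(post_formula) > 0: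
--         return token[len(pre_formula):len(token)-len(post_formula)], pre_formula, post_formula
--
--     return token[len(pre_formula):], pre_formula, post_formula
-- ===== SOURCE B (Python) =====
-- def _get_math_formula(token):
--     # One right-to-left pass: b ends as the index of the first char that is not
--     # '<' or '>', o as the index of the first math operator (n if absent).
--     n = len(token)
--     b = n
--     o = n
--     i = n
--     for c in reversed(token):
--         i -= 1
--         if c not in '<>':
--             b = i
--         if c in '+-*/&|':
--             o = i
--     if o < n and b < o:
--         return token[b:o], token[:b], token[o:]
--     return token[b:], token[:b], ''
-- ===== Notes on version B (the rewrite author's own statement) =====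
-- stated objective: alternative
-- what changed: Replaces A's two forward accumulating loops (an angle-bracket prefix loop plus an in_math/valid_chars state machine that builds post_formula by repeated string concatenation) with a single right-to-left pass that only tracks two indices (first non-bracket char, first operator) and then returns three slices.
import Mathlib
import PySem

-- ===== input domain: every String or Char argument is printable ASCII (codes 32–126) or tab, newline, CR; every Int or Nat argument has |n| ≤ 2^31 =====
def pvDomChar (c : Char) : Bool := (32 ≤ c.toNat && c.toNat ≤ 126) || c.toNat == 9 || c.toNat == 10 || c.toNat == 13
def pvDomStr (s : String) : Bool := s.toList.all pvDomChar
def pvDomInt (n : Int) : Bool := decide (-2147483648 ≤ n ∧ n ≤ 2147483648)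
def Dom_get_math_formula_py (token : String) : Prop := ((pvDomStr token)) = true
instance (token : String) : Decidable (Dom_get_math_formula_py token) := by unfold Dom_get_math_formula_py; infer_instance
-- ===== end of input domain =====

-- B replaces A's two forward accumulating loops (prefix loop + in_math state machine building
-- post_formula char by char) with a single right-to-left pass that tracks two indices, then slices.

-- char sets used by both Pythons: ('<', '>') and ('+', '-', '*', '/', '&', '|')
def pvIsAngle (c : Char) : Bool := c = '<' || c = '>'
def pvIsOp (c : Char) : Bool := c = '+' || c = '-' || c = '*' || c = '/' || c = '&' || c = '|'

-- ===== PORT A =====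
-- first loop: accumulate leading '<'/'>' chars, break at the first other char
def pvA_preLoop : List Char → List Char
  | [] => []
  | c :: cs => if pvIsAngle c then c :: pvA_preLoop cs else []

-- second loop: state (in_math, valid_chars, post_formula), break when an operator is first
def pvA_mathLoop : List Char → Bool → Nat → List Char → List Char
  | [], _, _, post => post
  | c :: cs, inMath, valid, post =>
    if !inMath then
      if pvIsOp c then
        if valid < 1 then post
        else pvA_mathLoop cs true valid (post ++ [c])
      else pvA_mathLoop cs false (valid + 1) post
    else pvA_mathLoop cs true valid (post ++ [c])

def get_math_formula_py (token : String) : String × String × String :=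
  let ts := token.toList
  let pre := pvA_preLoop ts
  let post := pvA_mathLoop (PySem.List.slice ts (some (pre.length : Int)) none) false 0 []
  if post.length > 0 then
    (String.ofList (PySem.List.slice ts (some (pre.length : Int)) (some ((ts.length : Int) - (post.length : Int)))),
     String.ofList pre, String.ofList post)
  else
    (String.ofList (PySem.List.slice ts (some (pre.length : Int)) none), String.ofList pre, String.ofList post)

-- ===== PORT B =====
-- the 'for c in reversed(token)' loop: state (i, b, o); i is decremented first,
-- b := i whenever c is not '<'/'>', o := i whenever c is an operator
def pvB_loop : List Char → Nat × Nat × Nat → Nat × Nat × Nat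
  | [], st => st
  | c :: cs, (i, b, o) =>
    let i' := i - 1
    pvB_loop cs (i', if !pvIsAngle c then i' else b, if pvIsOp c then i' else o)

def get_math_formula_py_alt (token : String) : String × String × String :=
  let ts := token.toList
  let n := ts.length
  let (_, b, o) := pvB_loop ts.reverse (n, n, n)
  if o < n ∧ b < o then
    (String.ofList (PySem.List.slice ts (some (b : Int)) (some (o : Int))),
     String.ofList (PySem.List.slice ts none (some (b : Int))),
     String.ofList (PySem.List.slice ts (some (o : Int)) none))
  else
    (String.ofList (PySem.List.slice ts (some (b : Int)) none),
     String.ofList (PySem.List.slice ts none (some (b : Int))), "")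

-- ===== PRECONDITION & SPEC =====
def Spec_get_math_formula_py (token : String) (out : String × String × String) : Prop := out = get_math_formula_py_alt token
instance (token : String) (out : String × String × String) : Decidable (Spec_get_math_formula_py token out) := by unfold Spec_get_math_formula_py; infer_instance

-- ===== CLAIM (what is proved, stated in full; the proofs are below) =====
def Claim_equal_get_math_formula_py : Prop := ∀ (token : String), Dom_get_math_formula_py token → Spec_get_math_formula_py token (get_math_formula_py token)

-- ===== LEMMAS AND PROOFS =====

theorem pvAngle_not_op {c : Char} (h : pvIsAngle c = true) : pvIsOp c = false := by
  simp only [pvIsAngle, Bool.or_eq_true, decide_eq_true_eq] at h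
  rcases h with h | h <;> subst h <;> rfl

theorem pvA_preLoop_eq_takeWhile (ts : List Char) : pvA_preLoop ts = ts.takeWhile pvIsAngle := by
  induction ts with
  | nil => rfl
  | cons c cs ih => by_cases h : pvIsAngle c <;> simp [pvA_preLoop, h, ih]

theorem pvA_mathLoop_inMath (cs : List Char) : ∀ (v : Nat) (post : List Char),
    pvA_mathLoop cs true v post = post ++ cs := by
  induction cs with
  | nil => simp [pvA_mathLoop]
  | cons c cs ih => intro v post; simp [pvA_mathLoop, ih]

-- A's second loop, characterised by takeWhile/dropWhile on the not-operator predicate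
theorem pvA_mathLoop_spec (cs : List Char) : ∀ (v : Nat),
    pvA_mathLoop cs false v [] =
      if cs.dropWhile (fun c => !pvIsOp c) = [] ∨ v + (cs.takeWhile (fun c => !pvIsOp c)).length < 1
      then [] else cs.dropWhile (fun c => !pvIsOp c) := by
  induction cs with
  | nil => intro v; simp [pvA_mathLoop]
  | cons c cs ih =>
    intro v
    by_cases h : pvIsOp c
    · simp only [pvA_mathLoop, h, Bool.not_false, if_true, List.dropWhile_cons, List.takeWhile_cons,
        Bool.not_true, Bool.false_eq_true, if_false, List.length_nil]
      by_cases hv : v < 1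
      · simp [hv]
      · simp only [Nat.add_zero, hv, reduceCtorEq, or_false, if_false]
        rw [pvA_mathLoop_inMath]; simp
    · simp only [pvA_mathLoop, h, Bool.not_false, if_true, Bool.false_eq_true, if_false,
        List.dropWhile_cons, List.takeWhile_cons, Bool.not_false, List.length_cons]
      rw [ih (v + 1)]
      have : v + 1 + (cs.takeWhile (fun c => !pvIsOp c)).length
           = v + ((cs.takeWhile (fun c => !pvIsOp c)).length + 1) := by omega
      rw [this]

theorem pvB_loop_append (xs ys : List Char) : ∀ (st : Nat × Nat × Nat),
    pvB_loop (xs ++ ys) st = pvB_loop ys (pvB_loop xs st) := by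
  induction xs with
  | nil => intro st; rfl
  | cons c cs ih => intro ⟨i, b, o⟩; simp [pvB_loop, ih]

-- B's reverse loop: b ends at the first non-angle index (shifted by k), o at the first
-- operator index (shifted by k); an absent witness leaves the initial value
theorem pvB_loop_spec (rs : List Char) : ∀ (k b o : Nat),
    pvB_loop rs.reverse (k + rs.length, b, o) =
      (k,
       if rs.dropWhile pvIsAngle = [] then b else k + (rs.takeWhile pvIsAngle).length,
       if rs.dropWhile (fun c => !pvIsOp c) = [] then o
       else k + (rs.takeWhile (fun c => !pvIsOp c)).length) := by
  induction rs with
  | nil => intro k b o; simp [pvB_loop]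
  | cons c cs ih =>
    intro k b o
    have hlen : k + (c :: cs).length = (k + 1) + cs.length := by simp; omega
    rw [List.reverse_cons, pvB_loop_append, hlen, ih (k + 1) b o]
    simp only [pvB_loop, List.dropWhile_cons, List.takeWhile_cons]
    by_cases ha : pvIsAngle c
    · have hop : pvIsOp c = false := pvAngle_not_op ha
      by_cases hd : cs.dropWhile (fun c => !pvIsOp c) = [] <;>
        by_cases hda : cs.dropWhile pvIsAngle = [] <;>
          simp [ha, hop, hd, hda] <;> omega
    · by_cases hop : pvIsOp c
      · simp [ha, hop]
      · by_cases hd : cs.dropWhile (fun c => !pvIsOp c) = [] <;> simp [ha, hop, hd] <;> try omega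

-- takeWhile/dropWhile across a block that wholly satisfies the predicate
theorem pv_takeWhile_append {p : Char → Bool} (l1 l2 : List Char) (h : ∀ x ∈ l1, p x = true) :
    (l1 ++ l2).takeWhile p = l1 ++ l2.takeWhile p ∧ (l1 ++ l2).dropWhile p = l2.dropWhile p := by
  induction l1 with
  | nil => simp
  | cons c cs ih =>
    have hc : p c = true := h c (by simp)
    have ih' := ih (fun x hx => h x (by simp [hx]))
    simp [hc, ih'.1, ih'.2]

-- ===== VERDICT (by name: the statement is the Claim_ definition above) =====
theorem get_math_formula_py_spec : Claim_equal_get_math_formula_py := by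
  unfold Claim_equal_get_math_formula_py
  intro token _
  unfold Spec_get_math_formula_py get_math_formula_py get_math_formula_py_alt
  simp only [pvA_preLoop_eq_takeWhile]
  set ts := token.toList with hts
  set pre := ts.takeWhile pvIsAngle with hpre
  set rest := ts.dropWhile pvIsAngle with hrest
  have hsplit : pre ++ rest = ts := List.takeWhile_append_dropWhile
  have hdrop : ts.drop pre.length = rest := by
    rw [← hsplit]; exact List.drop_left
  have htake : ts.take pre.length = pre := by
    rw [← hsplit]; exact List.take_left
  have hslice_from : PySem.List.slice ts (some (pre.length : Int)) none = rest := by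
    rw [PySem.List.slice_from_natCast]; exact hdrop
  have hlen : ts.length = pre.length + rest.length := by
    rw [← hsplit, List.length_append]
  set nm := rest.takeWhile (fun c => !pvIsOp c) with hnm
  set d := rest.dropWhile (fun c => !pvIsOp c) with hd
  have hrsplit : nm ++ d = rest := List.takeWhile_append_dropWhile
  -- every char of pre is an angle bracket, hence not an operator
  have hpre_all : ∀ x ∈ pre, (!pvIsOp x) = true := by
    intro x hx
    have : pvIsAngle x = true := List.mem_takeWhile_imp (hpre ▸ hx)
    simp [pvAngle_not_op this]
  have hts_tw := pv_takeWhile_append pre rest hpre_all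
  have htwts : ts.takeWhile (fun c => !pvIsOp c) = pre ++ nm := by
    rw [← hsplit]; rw [hts_tw.1]
  have hdwts : ts.dropWhile (fun c => !pvIsOp c) = d := by
    rw [← hsplit]; rw [hts_tw.2]
  -- evaluate B's loop
  have hloop := pvB_loop_spec ts 0 ts.length ts.length
  rw [Nat.zero_add] at hloop
  rw [hslice_from, pvA_mathLoop_spec, hloop, htwts, hdwts]
  have hB : (if ts.dropWhile pvIsAngle = [] then ts.length else 0 + pre.length) = pre.length := by
    by_cases he : ts.dropWhile pvIsAngle = []
    · have : rest = [] := by rw [hrest]; exact he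
      simp [he, hlen, this]
    · simp [he]
  rw [hB]
  have hslice_take : PySem.List.slice ts none (some ((pre.length : Nat) : Int)) = pre := by
    rw [PySem.List.slice_to_natCast]; exact htake
  by_cases hde : d = []
  · -- no operator after the angle prefix: both return (rest, pre, '')
    have hor : d = [] ∨ 0 + nm.length < 1 := Or.inl hde
    rw [if_pos hor, if_pos hde]
    rw [if_neg (by simp : ¬ 0 < ([] : List Char).length)]
    have hc2 : ¬ (ts.length < ts.length ∧ pre.length < ts.length) := by omega
    rw [if_neg hc2, hslice_from, hslice_take]
  · have hdl : 0 < d.length := List.length_pos_iff.mpr hde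
    have hrl : rest.length = nm.length + d.length := by
      rw [← hrsplit, List.length_append]
    by_cases h0 : nm = []
    · -- operator at the very start of the remainder: no split, post = ''
      have hor : d = [] ∨ 0 + nm.length < 1 := Or.inr (by simp [h0])
      rw [if_pos hor, if_neg hde]
      rw [if_neg (by simp : ¬ 0 < ([] : List Char).length)]
      have hc2 : ¬ (0 + (pre ++ nm).length < ts.length ∧ pre.length < 0 + (pre ++ nm).length) := by
        rw [List.length_append, h0]; simp
      rw [if_neg hc2, hslice_from, hslice_take]
    · -- operator after ≥ 1 name chars: name = nm, post = d
      have hnml : 0 < nm.length := List.length_pos_iff.mpr h0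
      have hcondA : ¬ (d = [] ∨ 0 + nm.length < 1) := by
        push Not; exact ⟨hde, by omega⟩
      have hcondB : 0 + (pre ++ nm).length < ts.length ∧ pre.length < 0 + (pre ++ nm).length := by
        rw [List.length_append]; omega
      rw [if_neg hcondA, if_neg hde, if_pos hdl, if_pos hcondB]
      have hsliceA : PySem.List.slice ts (some (pre.length : Int))
          (some ((ts.length : Int) - (d.length : Int))) = nm := by
        have hborder : (ts.length : Int) - (d.length : Int) = ((pre.length + nm.length : Nat) : Int) := by
          push_cast; omega
        rw [hborder, PySem.List.slice_natCast, hdrop]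
        rw [← hrsplit]
        have : pre.length + nm.length - pre.length = nm.length := by omega
        rw [this, List.take_left]
      have hBname : PySem.List.slice ts (some (pre.length : Int))
          (some ((0 + (pre ++ nm).length : Nat) : Int)) = nm := by
        rw [PySem.List.slice_natCast, hdrop, Nat.zero_add, List.length_append]
        rw [← hrsplit]
        have : pre.length + nm.length - pre.length = nm.length := by omega
        rw [this, List.take_left]
      have hBpost : PySem.List.slice ts (some ((0 + (pre ++ nm).length : Nat) : Int)) none = d := by
        rw [PySem.List.slice_from_natCast, Nat.zero_add, ← hsplit, ← hrsplit, ← List.append_assoc]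
        exact List.drop_left
      rw [hsliceA, hBname, hBpost, hslice_take]
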